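-- pv_equiv track=rewrite | github.com/lanl/QAOA_vs_QA | create_horizontal_heavy_hex_Pegasus_embeddings.py | get_pegasus_cell_coordinates_horizontal_heavy_hex
-- ===== SOURCE A (Python) =====
-- from itertools import cycle
--
-- def get_pegasus_cell_coordinates_horizontal_heavy_hex(N, initial_cell):
-- 	new_cells = [initial_cell]
-- 	if initial_cell[0] == 2:
-- 		pool = cycle([1, 0, 2])
-- 	elif initial_cell[0] == 1:
-- 		pool = cycle([0, 2, 1])
-- 	elif initial_cell[0] == 0:
-- 		pool = cycle([2, 1, 0])
-- 	index_zero_list = [next(pool) for a in range(N)]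
--
-- 	index_two_list = []
-- 	MOD = initial_cell[2]%2
-- 	assert MOD==1, "To make things simple, we enfore that the first coordinate has an odd number in the 3rd index coordinate"
-- 	offset = initial_cell[2]
-- 	while len(index_two_list) < N:
-- 		if MOD == 0:
-- 			index_two_list.append(offset+1)
-- 			MOD = 1
-- 		elif MOD == 1:
-- 			index_two_list.append(offset+1)
-- 			index_two_list.append(offset+1)
-- 			MOD = 0
-- 		offset = offset+1
--
-- 	index_one_list = []
-- 	offset = initial_cell[1]
-- 	COUNT = 0
-- 	while len(index_one_list) < N:
-- 		COUNT += 1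
-- 		if COUNT == 1:
-- 			index_one_list.append(offset)
-- 		else:
-- 			index_one_list.append(offset)
-- 			index_one_list.append(offset)
-- 			index_one_list.append(offset)
-- 		offset += 1
--
-- 	for i in range(N-1):
-- 		new_cells.append((index_zero_list[i], index_one_list[i], index_two_list[i]))
-- 	return new_cells
-- ===== SOURCE B (Python) =====
-- def get_pegasus_cell_coordinates_horizontal_heavy_hex(N, initial_cell):
-- 	c0, c1, c2 = initial_cell
-- 	assert c2 % 2 == 1, "To make things simple, we enfore that the first coordinate has an odd number in the 3rd index coordinate"
-- 	cells = [initial_cell]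
-- 	for i in range(N - 1):
-- 		zero = (c0 - 1 - i) % 3
-- 		one = c1 if i == 0 else c1 + 1 + (i - 1) // 3
-- 		two = c2 + 1 + 2 * (i // 3) + (1 if i % 3 == 2 else 0)
-- 		cells.append((zero, one, two))
-- 	return cells
-- ===== Notes on version B (the rewrite author's own statement) =====
-- stated objective: simpler
-- what changed: Replaces the cycle-object pass and the two overshooting while-loops (three staged index lists, then an assembly loop) with one direct pass that computes each coordinate by a closed-form formula ((c0-1-i)%3, c1+1+(i-1)//3, c2+1+2*(i//3)+carry) and appends the cell immediately; Pre_ excludes exactly the inputs where A raises (even third coordinate -> AssertionError; N>=1 with first coordinate outside {0,1,2} -> NameError).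
import Mathlib
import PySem

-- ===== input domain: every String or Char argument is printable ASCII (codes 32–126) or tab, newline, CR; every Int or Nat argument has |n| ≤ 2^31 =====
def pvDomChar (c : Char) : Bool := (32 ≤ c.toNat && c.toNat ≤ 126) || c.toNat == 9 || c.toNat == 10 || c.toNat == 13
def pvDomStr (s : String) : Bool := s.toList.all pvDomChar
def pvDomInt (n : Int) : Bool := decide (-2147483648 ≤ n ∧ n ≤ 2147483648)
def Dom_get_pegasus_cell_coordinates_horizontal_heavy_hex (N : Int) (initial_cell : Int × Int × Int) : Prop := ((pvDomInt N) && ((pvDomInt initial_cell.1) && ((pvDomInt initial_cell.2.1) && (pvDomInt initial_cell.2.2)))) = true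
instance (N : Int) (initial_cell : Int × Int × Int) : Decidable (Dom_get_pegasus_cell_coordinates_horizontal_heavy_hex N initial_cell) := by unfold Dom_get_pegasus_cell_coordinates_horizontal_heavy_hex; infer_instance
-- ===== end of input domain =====

-- ===== PORT A =====
-- B changes the algorithm (one closed-form pass instead of three staged list builds); objective: simpler.

-- `[next(pool) for a in range(n)]` where pool = itertools.cycle(ys): take n elements,
-- rotating the pool state exactly as the iterator advances.
def pvCycleTake : Nat → List Int → List Int
  | 0, _ => []
  | _ + 1, [] => []
  | n + 1, x :: rest => x :: pvCycleTake n (rest ++ [x])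

-- the first while loop building index_two_list; fuel bounds the iterations (each
-- iteration appends at least one element, so N.toNat fuel suffices).
def pvBuildTwo (fuel : Nat) (N : Int) (acc : List Int) (MOD offset : Int) : List Int :=
  match fuel with
  | 0 => acc
  | f + 1 =>
    if (acc.length : Int) < N then
      if MOD = 0 then pvBuildTwo f N (acc ++ [offset + 1]) 1 (offset + 1)
      else if MOD = 1 then pvBuildTwo f N (acc ++ [offset + 1, offset + 1]) 0 (offset + 1)
      else pvBuildTwo f N acc MOD (offset + 1)   -- unreachable: MOD = c2 % 2 ∈ {0,1}
    else acc

-- the second while loop building index_one_list.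
def pvBuildOne (fuel : Nat) (N : Int) (acc : List Int) (offset COUNT : Int) : List Int :=
  match fuel with
  | 0 => acc
  | f + 1 =>
    if (acc.length : Int) < N then
      if COUNT + 1 = 1 then pvBuildOne f N (acc ++ [offset]) (offset + 1) (COUNT + 1)
      else pvBuildOne f N (acc ++ [offset, offset, offset]) (offset + 1) (COUNT + 1)
    else acc

-- On inputs where initial_cell.1 ∉ {0,1,2} and N ≥ 1 the Python raises NameError
-- (excluded by Pre_); the default pool branch below is never claimed about.
def get_pegasus_cell_coordinates_horizontal_heavy_hex (N : Int) (initial_cell : Int × Int × Int) : List (Int × Int × Int) :=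
  let new_cells : List (Int × Int × Int) := [initial_cell]
  let pool : List Int :=
    if initial_cell.1 = 2 then [1, 0, 2]
    else if initial_cell.1 = 1 then [0, 2, 1]
    else [2, 1, 0]
  let index_zero_list := pvCycleTake N.toNat pool
  let MOD := PySem.Int.mod initial_cell.2.2 2
  -- assert MOD == 1: raises on even third coordinate; excluded by Pre_.
  let index_two_list := pvBuildTwo N.toNat N [] MOD initial_cell.2.2
  let index_one_list := pvBuildOne N.toNat N [] initial_cell.2.1 0
  (PySem.List.pyRange 0 (N - 1) 1).foldl
    (fun cells i =>
      cells ++ [(PySem.List.pyGetD index_zero_list i 0,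
                 PySem.List.pyGetD index_one_list i 0,
                 PySem.List.pyGetD index_two_list i 0)])
    new_cells

-- ===== PORT B =====
def get_pegasus_cell_coordinates_horizontal_heavy_hex_alt (N : Int) (initial_cell : Int × Int × Int) : List (Int × Int × Int) :=
  let c0 := initial_cell.1
  let c1 := initial_cell.2.1
  let c2 := initial_cell.2.2
  -- assert c2 % 2 == 1: raises on even third coordinate; excluded by Pre_.
  (PySem.List.pyRange 0 (N - 1) 1).foldl
    (fun cells i =>
      cells ++ [(PySem.Int.mod (c0 - 1 - i) 3,
                 if i = 0 then c1 else c1 + 1 + PySem.Int.floordiv (i - 1) 3,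
                 c2 + 1 + 2 * PySem.Int.floordiv i 3 + (if PySem.Int.mod i 3 = 2 then 1 else 0))])
    [initial_cell]

-- ===== PRECONDITION & SPEC =====
-- Pre_ excludes exactly the inputs where A raises: an even third coordinate
-- (AssertionError) and, when N ≥ 1, a first coordinate outside {0,1,2} (NameError).
def Pre_get_pegasus_cell_coordinates_horizontal_heavy_hex (N : Int) (initial_cell : Int × Int × Int) : Prop :=
  PySem.Int.mod initial_cell.2.2 2 = 1 ∧
  (1 ≤ N → initial_cell.1 = 0 ∨ initial_cell.1 = 1 ∨ initial_cell.1 = 2)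
instance (N : Int) (initial_cell : Int × Int × Int) : Decidable (Pre_get_pegasus_cell_coordinates_horizontal_heavy_hex N initial_cell) := by unfold Pre_get_pegasus_cell_coordinates_horizontal_heavy_hex; infer_instance

def pvWitness_get_pegasus_cell_coordinates_horizontal_heavy_hex : Int × (Int × Int × Int) := (7, (2, 4, 3))

def Spec_get_pegasus_cell_coordinates_horizontal_heavy_hex (N : Int) (initial_cell : Int × Int × Int) (out : List (Int × Int × Int)) : Prop := out = get_pegasus_cell_coordinates_horizontal_heavy_hex_alt N initial_cell
instance (N : Int) (initial_cell : Int × Int × Int) (out : List (Int × Int × Int)) : Decidable (Spec_get_pegasus_cell_coordinates_horizontal_heavy_hex N initial_cell out) := by unfold Spec_get_pegasus_cell_coordinates_horizontal_heavy_hex; infer_instance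

-- ===== CLAIM (what is proved, stated in full; the proofs are below) =====
def Claim_equal_get_pegasus_cell_coordinates_horizontal_heavy_hex : Prop := ∀ (N : Int) (initial_cell : Int × Int × Int), Dom_get_pegasus_cell_coordinates_horizontal_heavy_hex N initial_cell → Pre_get_pegasus_cell_coordinates_horizontal_heavy_hex N initial_cell → Spec_get_pegasus_cell_coordinates_horizontal_heavy_hex N initial_cell (get_pegasus_cell_coordinates_horizontal_heavy_hex N initial_cell)
-- ===== LEMMAS AND PROOFS =====

-- the closed forms of the two staged lists, indexed over Nat (proof-only helpers)
def pvF2 (c2 : Int) (k : Nat) : Int := c2 + 1 + 2 * ((k / 3 : Nat) : Int) + (if k % 3 = 2 then 1 else 0)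
def pvF1 (c1 : Int) (k : Nat) : Int := if k = 0 then c1 else c1 + 1 + (((k - 1) / 3 : Nat) : Int)

theorem pvCycleTake_unfold3 (n : Nat) (a b c : Int) :
    pvCycleTake (n + 3) [a, b, c] = a :: b :: c :: pvCycleTake n [a, b, c] := by
  show pvCycleTake (((n + 1) + 1) + 1) [a, b, c] = _
  simp [pvCycleTake]

theorem pvCycleTake_getD (a b c : Int) : ∀ (k m : Nat), k < m →
    (pvCycleTake m [a, b, c]).getD k 0 = [a, b, c].getD (k % 3) 0 := by
  intro k
  induction k using Nat.strong_induction_on with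
  | _ k ih =>
    intro m hkm
    by_cases h3 : 3 ≤ k
    · obtain ⟨n, rfl⟩ : ∃ n, m = n + 3 := ⟨m - 3, by omega⟩
      rw [pvCycleTake_unfold3]
      have hk : k = (k - 3) + 3 := by omega
      rw [hk]
      have := ih (k - 3) (by omega) n (by omega)
      simpa [List.getD, Nat.add_mod] using this
    · interval_cases k
      · obtain ⟨n, rfl⟩ : ∃ n, m = n + 1 := ⟨m - 1, by omega⟩
        simp [pvCycleTake]
      · obtain ⟨n, rfl⟩ : ∃ n, m = n + 2 := ⟨m - 2, by omega⟩
        show (pvCycleTake ((n + 1) + 1) _).getD 1 0 = _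
        simp [pvCycleTake]
      · obtain ⟨n, rfl⟩ : ∃ n, m = n + 3 := ⟨m - 3, by omega⟩
        rw [pvCycleTake_unfold3]
        simp

theorem pvBuildTwo_stop {N : Int} {acc : List Int} {MOD off : Int} (f : Nat)
    (h : ¬ (acc.length : Int) < N) : pvBuildTwo f N acc MOD off = acc := by
  cases f <;> simp [pvBuildTwo, h]

theorem pvBuildTwo_step1 {N : Int} {acc : List Int} {off : Int} (f : Nat)
    (h : (acc.length : Int) < N) :
    pvBuildTwo (f + 1) N acc 1 off = pvBuildTwo f N (acc ++ [off + 1, off + 1]) 0 (off + 1) := by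
  simp [pvBuildTwo, h]

theorem pvBuildTwo_step0 {N : Int} {acc : List Int} {off : Int} (f : Nat)
    (h : (acc.length : Int) < N) :
    pvBuildTwo (f + 1) N acc 0 off = pvBuildTwo f N (acc ++ [off + 1]) 1 (off + 1) := by
  simp [pvBuildTwo, h]

theorem pvBuildTwo_getD (N c2 : Int) : ∀ (f q : Nat) (acc : List Int),
    acc.length = 3 * q →
    (∀ j, j < acc.length → acc.getD j 0 = pvF2 c2 j) →
    N ≤ 3 * q + f →
    ∀ k : Nat, (k < acc.length ∨ (k : Int) < N) →
    (pvBuildTwo f N acc 1 (c2 + 2 * q)).getD k 0 = pvF2 c2 k := by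
  intro f
  induction f using Nat.strong_induction_on with
  | _ f ih =>
    intro q acc hlen hcont hfuel k hk
    by_cases hc : (acc.length : Int) < N
    case neg =>
      rw [pvBuildTwo_stop f hc]
      exact hcont k (by omega)
    case pos =>
      obtain ⟨f', rfl⟩ : ∃ f', f = f' + 1 := ⟨f - 1, by omega⟩
      rw [pvBuildTwo_step1 f' hc]
      set v := c2 + 2 * (q : Int) + 1 with hv
      have hcont2 : ∀ j, j < (acc ++ [v, v]).length → (acc ++ [v, v]).getD j 0 = pvF2 c2 j := by
        intro j hj
        simp only [List.length_append, List.length_cons, List.length_nil] at hj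
        by_cases hjl : j < acc.length
        · rw [List.getD_append _ _ _ _ hjl]; exact hcont j hjl
        · rw [List.getD_append_right _ _ _ _ (by omega)]
          have h1 : j / 3 = q := by omega
          have h2 : j % 3 ≠ 2 := by omega
          rcases (by omega : j - acc.length = 0 ∨ j - acc.length = 1) with h | h <;>
            simp [h, pvF2, h1, h2, hv] <;> omega
      by_cases hc2 : ((acc ++ [v, v]).length : Int) < N
      case neg =>
        rw [pvBuildTwo_stop f' hc2]
        refine hcont2 k ?_
        simp only [List.length_append, List.length_cons, List.length_nil] at hc2 ⊢
        push_cast at hc2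
        omega
      case pos =>
        obtain ⟨f'', rfl⟩ : ∃ f'', f' = f'' + 1 := by
          refine ⟨f' - 1, ?_⟩
          simp only [List.length_append, List.length_cons, List.length_nil] at hc2
          push_cast at hc2
          omega
        rw [pvBuildTwo_step0 f'' hc2]
        have hl3 : (acc ++ [v, v]) ++ [v + 1] = acc ++ [v, v, v + 1] := by
          simp
        have hoff : v + 1 = c2 + 2 * ((q : Int) + 1) := by rw [hv]; ring
        rw [hl3, hoff]
        have := ih f'' (by omega) (q + 1) (acc ++ [v, v, c2 + 2 * ((q : Int) + 1)])
          (by simp [hlen]; omega) ?_ (by push_cast; omega) k ?_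
        · push_cast at this ⊢
          exact this
        · intro j hj
          simp only [List.length_append, hlen, List.length_cons, List.length_nil] at hj
          by_cases hjl : j < acc.length
          · rw [List.getD_append _ _ _ _ hjl]; exact hcont j hjl
          · rw [List.getD_append_right _ _ _ _ (by omega)]
            have h1 : j / 3 = q := by omega
            rcases (by omega : j - acc.length = 0 ∨ j - acc.length = 1 ∨ j - acc.length = 2)
              with h | h | h
            · have h2 : j % 3 ≠ 2 := by omega
              simp [h, pvF2, h1, h2, hv]; omega
            · have h2 : j % 3 ≠ 2 := by omega
              simp [h, pvF2, h1, h2, hv]; omega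
            · have h2 : j % 3 = 2 := by omega
              simp [h, pvF2, h1, h2, hv]; omega
        · rcases hk with hk | hk
          · left; simp only [List.length_append, List.length_cons, List.length_nil]; omega
          · right; exact hk

theorem pvBuildOne_stop {N : Int} {acc : List Int} {off cnt : Int} (f : Nat)
    (h : ¬ (acc.length : Int) < N) : pvBuildOne f N acc off cnt = acc := by
  cases f <;> simp [pvBuildOne, h]

theorem pvBuildOne_step {N : Int} {acc : List Int} {off cnt : Int} (f : Nat)
    (h : (acc.length : Int) < N) (hcnt : cnt + 1 ≠ 1) :
    pvBuildOne (f + 1) N acc off cnt = pvBuildOne f N (acc ++ [off, off, off]) (off + 1) (cnt + 1) := by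
  simp [pvBuildOne, h, hcnt]

theorem pvBuildOne_getD (N c1 : Int) : ∀ (f q : Nat) (acc : List Int),
    acc.length = 3 * q + 1 →
    (∀ j, j < acc.length → acc.getD j 0 = pvF1 c1 j) →
    N ≤ 3 * q + 1 + 3 * f →
    ∀ k : Nat, (k < acc.length ∨ (k : Int) < N) →
    (pvBuildOne f N acc (c1 + q + 1) (q + 1)).getD k 0 = pvF1 c1 k := by
  intro f
  induction f with
  | zero =>
    intro q acc hlen hcont hfuel k hk
    simp only [pvBuildOne]
    exact hcont k (by omega)
  | succ f ih =>
    intro q acc hlen hcont hfuel k hk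
    by_cases hc : (acc.length : Int) < N
    case neg =>
      rw [pvBuildOne_stop _ hc]
      exact hcont k (by omega)
    case pos =>
      rw [pvBuildOne_step f hc (by omega)]
      set o := c1 + (q : Int) + 1 with ho
      have hext : ∀ j, j < (acc ++ [o, o, o]).length → (acc ++ [o, o, o]).getD j 0 = pvF1 c1 j := by
        intro j hj
        simp only [List.length_append, hlen, List.length_cons, List.length_nil] at hj
        by_cases hjl : j < acc.length
        · rw [List.getD_append _ _ _ _ hjl]; exact hcont j hjl
        · rw [List.getD_append_right _ _ _ _ (by omega)]
          have hj0 : j ≠ 0 := by omega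
          have hq3 : (j - 1) / 3 = q := by omega
          rcases (by omega : j - acc.length = 0 ∨ j - acc.length = 1 ∨ j - acc.length = 2)
            with h | h | h <;> simp [h, pvF1, hj0, hq3, ho] <;> omega
      have hoff : o + 1 = c1 + ((q : Int) + 1) + 1 := by rw [ho]; ring
      rw [hoff]
      have := ih (q + 1) (acc ++ [o, o, o]) (by simp [hlen]; omega) hext
        (by push_cast; omega) k ?_
      · push_cast at this ⊢
        exact this
      · rcases hk with hk | hk
        · left; simp only [List.length_append, List.length_cons, List.length_nil]; omega
        · right; exact hk

-- ===== VERDICT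
-- ===== VERDICT (by name: the statement is the Claim_ definition above) =====
theorem get_pegasus_cell_coordinates_horizontal_heavy_hex_spec : Claim_equal_get_pegasus_cell_coordinates_horizontal_heavy_hex := by
  unfold Claim_equal_get_pegasus_cell_coordinates_horizontal_heavy_hex
    Spec_get_pegasus_cell_coordinates_horizontal_heavy_hex
  intro N ic _ hpre
  obtain ⟨hodd, hc0⟩ := hpre
  by_cases hN : N ≤ 1
  · simp [get_pegasus_cell_coordinates_horizontal_heavy_hex,
      get_pegasus_cell_coordinates_horizontal_heavy_hex_alt,
      PySem.List.pyRange_one_eq_nil (by omega : N - 1 ≤ 0)]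
  · have hN2 : 2 ≤ N := by omega
    obtain ⟨c0, c1, c2⟩ := ic
    simp only [get_pegasus_cell_coordinates_horizontal_heavy_hex,
      get_pegasus_cell_coordinates_horizontal_heavy_hex_alt]
    rw [PySem.List.foldl_append_singleton_eq_map, PySem.List.foldl_append_singleton_eq_map]
    congr 1
    apply List.map_congr_left
    intro i hi
    rw [PySem.List.mem_pyRange_one] at hi
    obtain ⟨hi0, hi1⟩ := hi
    obtain ⟨k, rfl⟩ : ∃ k : Nat, i = (k : Int) := ⟨i.toNat, (Int.toNat_of_nonneg hi0).symm⟩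
    have hNt : ((N.toNat : Int)) = N := Int.toNat_of_nonneg (by omega)
    have hkN : (k : Int) < N := by omega
    refine Prod.ext ?_ (Prod.ext ?_ ?_)
    · -- index zero component
      simp only [PySem.List.pyGetD_natCast]
      have hcyc : ∀ a b c : Int,
          (pvCycleTake N.toNat [a, b, c]).getD k 0 = [a, b, c].getD (k % 3) 0 :=
        fun a b c => pvCycleTake_getD a b c k N.toNat (by omega)
      have hk3 : (↑(k % 3) : Int) = (k : Int) % 3 := by omega
      rcases hc0 (by omega) with h | h | h <;> subst h <;>
        simp only [show ¬((0:Int) = 2) by decide, show ¬((0:Int) = 1) by decide,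
          show ¬((1:Int) = 2) by decide, if_true, if_false] <;>
        [rw [hcyc 2 1 0]; rw [hcyc 0 2 1]; rw [hcyc 1 0 2]] <;>
        rw [PySem.Int.mod_eq_emod_of_pos (by omega)] <;>
        rcases (by omega : k % 3 = 0 ∨ k % 3 = 1 ∨ k % 3 = 2) with h3 | h3 | h3 <;>
        simp [h3] <;> omega
    · -- index one component
      simp only [PySem.List.pyGetD_natCast]
      obtain ⟨t, ht⟩ : ∃ t, N.toNat = t + 1 := ⟨N.toNat - 1, by omega⟩
      rw [ht]
      have hstep : pvBuildOne (t + 1) N [] c1 0 = pvBuildOne t N [c1] (c1 + 1) 1 := by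
        simp [pvBuildOne, show (0:Int) < N by omega]
      rw [hstep]
      have hone := pvBuildOne_getD N c1 t 0 [c1] (by simp) ?_ (by omega) k (Or.inr hkN)
      · simp only [Nat.cast_zero, add_zero, zero_add] at hone
        rw [hone]
        rw [PySem.Int.floordiv_eq_ediv_of_pos (by omega)]
        by_cases hk0 : k = 0
        · simp [pvF1, hk0]
        · simp [pvF1, hk0, Int.natCast_eq_zero]
          omega
      · intro j hj
        simp only [List.length_cons, List.length_nil] at hj
        interval_cases j
        simp [pvF1]
    · -- index two component
      simp only [PySem.List.pyGetD_natCast]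
      rw [hodd]
      have htwo := pvBuildTwo_getD N c2 N.toNat 0 [] (by simp) (by simp) (by omega) k (Or.inr hkN)
      simp only [Nat.cast_zero, mul_zero, add_zero] at htwo
      rw [htwo]
      rw [PySem.Int.floordiv_eq_ediv_of_pos (by omega : (0:Int) < 3),
        PySem.Int.mod_eq_emod_of_pos (by omega : (0:Int) < 3)]
      by_cases hk2 : k % 3 = 2
      · simp [pvF2, hk2]
        omega
      · simp [pvF2, hk2]
        omega
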